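-- pv_equiv track=rewrite | github.com/changshoumeng/netqos | protocol.py | sizeof
-- ===== SOURCE A (Python) =====
-- def sizeof(s=""):
--     type_dic = {
--         "c": 1,
--         "b": 1,
--         "B": 1,
--         "h": 2,
--         "H": 2,
--         "i": 4,
--         "I": 4,
--         "Q": 8,
--     }
--     a = 0
--     for ch in s:
--         if ch not in type_dic:
--             continue
--         a += type_dic[ch]
--     return a
-- ===== SOURCE B (Python) =====
-- def sizeof(s=""):
--     return (s.count("c") + s.count("b") + s.count("B")
--             + 2 * (s.count("h") + s.count("H"))
--             + 4 * (s.count("i") + s.count("I"))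
--             + 8 * s.count("Q"))
-- ===== Notes on version B (the rewrite author's own statement) =====
-- stated objective: faster
-- what changed: Instead of scanning the string once with a per-character dict lookup and accumulator, B is a closed arithmetic expression over eight str.count calls, one per format character, weighted by its byte size; the counting runs in C instead of a Python-level loop.
import Mathlib
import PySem

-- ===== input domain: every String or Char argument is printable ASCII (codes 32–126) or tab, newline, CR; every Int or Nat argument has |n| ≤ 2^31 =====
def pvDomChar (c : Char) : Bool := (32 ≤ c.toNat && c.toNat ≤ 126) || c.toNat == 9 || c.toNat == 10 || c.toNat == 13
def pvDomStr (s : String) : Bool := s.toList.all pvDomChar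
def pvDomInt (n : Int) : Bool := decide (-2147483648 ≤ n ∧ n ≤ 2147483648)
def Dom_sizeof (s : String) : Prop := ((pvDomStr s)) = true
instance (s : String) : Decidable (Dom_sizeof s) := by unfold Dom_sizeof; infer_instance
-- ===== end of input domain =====

-- B replaces A's per-character dict-lookup scan with a closed arithmetic expression over
-- eight str.count calls, one per format character, weighted by its byte size (constant-factor faster: counting runs in C).

-- ===== PORT A =====
def pvTypeDicA : PySem.Dict Char Int :=
  PySem.Dict.ofList [('c',1),('b',1),('B',1),('h',2),('H',2),('i',4),('I',4),('Q',8)]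

def sizeof (s : String) : Int :=
  s.toList.foldl (fun a ch =>
    if pvTypeDicA.contains ch = false then a
    else a + pvTypeDicA.getD ch 0) 0

-- ===== PORT B =====
def sizeof_alt (s : String) : Int :=
  (PySem.Str.count s "c" : Int) + (PySem.Str.count s "b" : Int) + (PySem.Str.count s "B" : Int)
  + 2 * ((PySem.Str.count s "h" : Int) + (PySem.Str.count s "H" : Int))
  + 4 * ((PySem.Str.count s "i" : Int) + (PySem.Str.count s "I" : Int))
  + 8 * (PySem.Str.count s "Q" : Int)

-- ===== PRECONDITION & SPEC =====
def Spec_sizeof (s : String) (out : Int) : Prop := out = sizeof_alt s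
instance (s : String) (out : Int) : Decidable (Spec_sizeof s out) := by unfold Spec_sizeof; infer_instance

-- ===== CLAIM =====
def Claim_equal_sizeof : Prop := ∀ (s : String), Dom_sizeof s → Spec_sizeof s (sizeof s)

-- ===== LEMMAS AND PROOFS =====

-- the contribution of one character, as A's guarded lookup computes it
def pvSize (ch : Char) : Int :=
  if ch = 'c' then 1 else if ch = 'b' then 1 else if ch = 'B' then 1 else if ch = 'h' then 2
  else if ch = 'H' then 2 else if ch = 'i' then 4 else if ch = 'I' then 4 else if ch = 'Q' then 8 else 0

set_option maxHeartbeats 1000000 in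
lemma pvStep (ch : Char) (a : Int) :
    (if pvTypeDicA.contains ch = false then a else a + pvTypeDicA.getD ch 0) = a + pvSize ch := by
  have h : pvTypeDicA = PySem.Dict.mk [('c',1),('b',1),('B',1),('h',2),('H',2),('i',4),('I',4),('Q',8)] := rfl
  rw [h]
  simp only [PySem.Dict.contains_mk, PySem.Dict.getD_eq_get?_getD, PySem.Dict.get?_mk_cons, pvSize]
  split_ifs <;> simp_all [beq_iff_eq] <;> simp_all [eq_comm]

def pvCountSum (l : List Char) : Int :=
  (l.count 'c' : Int) * 1 + (l.count 'b' : Int) * 1 + (l.count 'B' : Int) * 1 +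
  (l.count 'h' : Int) * 2 + (l.count 'H' : Int) * 2 + (l.count 'i' : Int) * 4 +
  (l.count 'I' : Int) * 4 + (l.count 'Q' : Int) * 8

lemma pvCountSum_cons (ch : Char) (t : List Char) :
    pvCountSum (ch :: t) = pvCountSum t + pvSize ch := by
  simp only [pvCountSum, pvSize, List.count_cons]
  by_cases h1 : ch = 'c'
  · subst h1; simp; ring
  by_cases h2 : ch = 'b'
  · subst h2; simp; ring
  by_cases h3 : ch = 'B'
  · subst h3; simp; ring
  by_cases h4 : ch = 'h'
  · subst h4; simp; ring
  by_cases h5 : ch = 'H'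
  · subst h5; simp; ring
  by_cases h6 : ch = 'i'
  · subst h6; simp; ring
  by_cases h7 : ch = 'I'
  · subst h7; simp; ring
  by_cases h8 : ch = 'Q'
  · subst h8; simp; ring
  simp [h1,h2,h3,h4,h5,h6,h7,h8]

lemma sizeof_fold (l : List Char) (a : Int) :
    l.foldl (fun a ch =>
      if pvTypeDicA.contains ch = false then a
      else a + pvTypeDicA.getD ch 0) a = a + pvCountSum l := by
  induction l generalizing a with
  | nil => simp [pvCountSum]
  | cons ch t ih =>
    rw [List.foldl_cons, pvStep, ih, pvCountSum_cons]
    ring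

-- Chars.count.go with a single-character needle counts occurrences of that character
lemma pvGoSingle (c : Char) : ∀ (l : List Char) (acc fuel : ℕ), l.length ≤ fuel →
    PySem.Chars.count.go [c] fuel l acc = acc + l.count c := by
  intro l
  induction l with
  | nil => intro acc fuel _; cases fuel <;> simp [PySem.Chars.count.go]
  | cons h t ih =>
    intro acc fuel hf
    cases fuel with
    | zero => simp at hf
    | succ n =>
      rw [PySem.Chars.count.go]
      simp only [List.isPrefixOf, List.length_cons] at *
      by_cases hc : c = h
      · subst hc
        simp [ih _ n (by omega)]
        ring
      · have hb : (c == h) = false := by simp [hc]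
        simp [hb, ih _ n (by omega), Ne.symm hc]

-- s.count("x") for a one-character needle is the character count
lemma pvStrCountSingle (s : String) (c : Char) :
    PySem.Str.count s (String.ofList [c]) = s.toList.count c := by
  simp only [PySem.Str.count, PySem.Chars.count, String.toList_ofList, List.isEmpty_cons,
    Bool.false_eq_true, if_false]
  simpa using pvGoSingle c s.toList 0 s.toList.length le_rfl

lemma sizeof_alt_counts (s : String) : sizeof_alt s = pvCountSum s.toList := by
  unfold sizeof_alt pvCountSum
  rw [show ("c" : String) = String.ofList ['c'] from rfl, pvStrCountSingle,
      show ("b" : String) = String.ofList ['b'] from rfl, pvStrCountSingle,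
      show ("B" : String) = String.ofList ['B'] from rfl, pvStrCountSingle,
      show ("h" : String) = String.ofList ['h'] from rfl, pvStrCountSingle,
      show ("H" : String) = String.ofList ['H'] from rfl, pvStrCountSingle,
      show ("i" : String) = String.ofList ['i'] from rfl, pvStrCountSingle,
      show ("I" : String) = String.ofList ['I'] from rfl, pvStrCountSingle,
      show ("Q" : String) = String.ofList ['Q'] from rfl, pvStrCountSingle]
  ring

-- ===== VERDICT =====
theorem sizeof_spec : Claim_equal_sizeof := by
  intro s _
  unfold Spec_sizeof
  rw [sizeof_alt_counts, sizeof, sizeof_fold]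
  ring
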